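-- pv_equiv track=rewrite | github.com/ayukyo/alltoolkit | Python/cellular_automata_utils/mod.py | pattern_to_coords
-- ===== SOURCE A (Python) =====
-- from typing import List, Tuple, Optional, Callable, Dict, Set, Iterator
--
-- def pattern_to_coords(pattern_str: str, alive_char: str = '#') -> List[Tuple[int, int, int]]:
--     """
--     将图案字符串转换为坐标列表。
--
--     Args:
--         pattern_str: 图案字符串，使用换行分隔行
--         alive_char: 表示活细胞的字符
--
--     Returns:
--         坐标列表 [(x, y, 1), ...]
--
--     Example:
--         >>> pattern = '''
--         ...  # #
--         ... # # #
--         ...  # #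
--         ... '''
--         >>> coords = pattern_to_coords(pattern)
--     """
--     coords = []
--     lines = pattern_str.strip().split('\n')
--     for y, line in enumerate(lines):
--         for x, char in enumerate(line):
--             if char == alive_char:
--                 coords.append((x, y, 1))
--     return coords
-- ===== SOURCE B (Python) =====
-- def pattern_to_coords(pattern_str: str, alive_char: str = '#'):
--     # One flat stateful scan over the stripped string instead of split + nested enumerate.
--     coords = []
--     x = 0
--     y = 0
--     for char in pattern_str.strip():
--         if char == '\n':
--             x = 0
--             y += 1
--         else:
--             if char == alive_char:
--                 coords.append((x, y, 1))
--             x += 1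
--     return coords
-- ===== Notes on version B (the rewrite author's own statement) =====
-- stated objective: alternative
-- what changed: Replaces strip+split('\n') with nested enumerate loops by a single flat character scan over the stripped string that maintains (x, y) counters and resets x on newline.
import Mathlib
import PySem

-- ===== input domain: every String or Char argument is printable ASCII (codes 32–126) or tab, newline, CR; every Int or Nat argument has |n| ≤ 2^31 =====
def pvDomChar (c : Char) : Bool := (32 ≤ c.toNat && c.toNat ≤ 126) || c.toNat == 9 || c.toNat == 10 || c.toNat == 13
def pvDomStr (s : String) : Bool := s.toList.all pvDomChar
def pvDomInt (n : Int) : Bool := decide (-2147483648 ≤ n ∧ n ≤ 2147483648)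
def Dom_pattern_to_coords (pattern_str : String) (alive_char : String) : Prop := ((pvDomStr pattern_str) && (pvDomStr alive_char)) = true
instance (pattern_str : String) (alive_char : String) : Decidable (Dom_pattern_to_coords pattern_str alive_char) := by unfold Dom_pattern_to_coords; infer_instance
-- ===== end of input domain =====

-- B replaces strip+split('\n') with nested enumerate loops by one flat stateful
-- character scan over the stripped string ((x,y) counters, x reset on '\n'); same cost, different decomposition.

-- ===== PORT A =====
def pattern_to_coords (pattern_str : String) (alive_char : String) : List (Int × Int × Int) :=
  let lines := PySem.Chars.splitOn (PySem.Chars.strip pattern_str.toList) ['\n']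
  (PySem.List.enumerate lines).foldl
    (fun coords yl =>
      (PySem.List.enumerate yl.2).foldl
        (fun coords xc =>
          if [xc.2] = alive_char.toList then coords ++ [(xc.1, yl.1, 1)] else coords)
        coords)
    []

-- ===== PORT B =====
def pattern_to_coords_alt (pattern_str : String) (alive_char : String) : List (Int × Int × Int) :=
  let stripped := PySem.Chars.strip pattern_str.toList
  (stripped.foldl
    (fun st c =>
      if c = '\n' then (st.1, 0, st.2.2 + 1)
      else ((if [c] = alive_char.toList then st.1 ++ [(st.2.1, st.2.2, 1)] else st.1),
            st.2.1 + 1, st.2.2))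
    ([], 0, 0)).1

-- ===== PRECONDITION & SPEC =====
def Spec_pattern_to_coords (pattern_str : String) (alive_char : String) (out : List (Int × Int × Int)) : Prop := out = pattern_to_coords_alt pattern_str alive_char
instance (pattern_str : String) (alive_char : String) (out : List (Int × Int × Int)) : Decidable (Spec_pattern_to_coords pattern_str alive_char out) := by unfold Spec_pattern_to_coords; infer_instance

-- ===== CLAIM (what is proved, stated in full; the proofs are below) =====
def Claim_equal_pattern_to_coords : Prop := ∀ (pattern_str : String) (alive_char : String), Dom_pattern_to_coords pattern_str alive_char → Spec_pattern_to_coords pattern_str alive_char (pattern_to_coords pattern_str alive_char)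

-- ===== LEMMAS AND PROOFS =====

-- structural version of split('\n')
def pvSplit : List Char → List (List Char)
  | [] => [[]]
  | c :: cs => if c = '\n' then [] :: pvSplit cs else (pvSplit cs).modifyHead (c :: ·)

-- A's nested loops, structurally
def pvRow (alive : List Char) : List Char → Int → Int → List (Int × Int × Int)
  | [], _, _ => []
  | c :: cs, x, y => (if [c] = alive then [(x, y, 1)] else []) ++ pvRow alive cs (x + 1) y

def pvRows (alive : List Char) : List (List Char) → Int → List (Int × Int × Int)
  | [], _ => []
  | l :: ls, y => pvRow alive l 0 y ++ pvRows alive ls (y + 1)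

-- B's flat scan, structurally
def pvScan (alive : List Char) : List Char → Int → Int → List (Int × Int × Int)
  | [], _, _ => []
  | c :: cs, x, y =>
    if c = '\n' then pvScan alive cs 0 (y + 1)
    else (if [c] = alive then [(x, y, 1)] else []) ++ pvScan alive cs (x + 1) y

theorem pvSplit_ne_nil (cs : List Char) : pvSplit cs ≠ [] := by
  cases cs with
  | nil => simp [pvSplit]
  | cons c cs =>
    simp only [pvSplit]
    split
    · simp
    · cases h : pvSplit cs with
      | nil => exact absurd h (pvSplit_ne_nil cs)
      | cons a t => simp

theorem pvSplitOn_go_eq (fuel : Nat) : ∀ (cs cur : List Char) (acc : List (List Char)),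
    cs.length < fuel →
    PySem.Chars.splitOn.go ['\n'] fuel cs cur acc
      = acc.reverse ++ (pvSplit cs).modifyHead (cur.reverse ++ ·) := by
  induction fuel with
  | zero => intro cs cur acc h; omega
  | succ f ih =>
    intro cs cur acc h
    cases cs with
    | nil => simp [PySem.Chars.splitOn.go, pvSplit]
    | cons c rest =>
      by_cases hc : c = '\n'
      · subst hc
        have hpre : List.isPrefixOf ['\n'] ('\n' :: rest) = true := by
          simp [List.isPrefixOf]
        rw [PySem.Chars.splitOn.go]
        simp only [hpre, if_true, List.length_cons, List.length_nil, List.drop_succ_cons,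
          List.drop_zero]
        rw [ih rest [] (cur.reverse :: acc) (by simpa using Nat.lt_of_succ_lt_succ h)]
        cases hs : pvSplit rest with
        | nil => exact absurd hs (pvSplit_ne_nil rest)
        | cons a t => simp [pvSplit, hs]
      · have hpre : List.isPrefixOf ['\n'] (c :: rest) = false := by
          simp [List.isPrefixOf]
          intro hcc; exact absurd hcc.symm hc
        rw [PySem.Chars.splitOn.go]
        simp only [hpre, Bool.false_eq_true, if_false]
        rw [ih rest (c :: cur) acc (by simpa using Nat.lt_of_succ_lt_succ h)]
        cases hs : pvSplit rest with
        | nil => exact absurd hs (pvSplit_ne_nil rest)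
        | cons a t => simp [pvSplit, hs, hc]

theorem pvSplitOn_eq (cs : List Char) : PySem.Chars.splitOn cs ['\n'] = pvSplit cs := by
  unfold PySem.Chars.splitOn
  rw [pvSplitOn_go_eq (cs.length + 1) cs [] [] (Nat.lt_succ_self _)]
  cases hs : pvSplit cs with
  | nil => exact absurd hs (pvSplit_ne_nil cs)
  | cons a t => simp

theorem pvInnerA (alive : List Char) (y : Int) :
    ∀ (line : List Char) (x : Int) (coords : List (Int × Int × Int)),
    (PySem.List.enumerate line x).foldl
        (fun coords xc => if [xc.2] = alive then coords ++ [(xc.1, y, 1)] else coords) coords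
      = coords ++ pvRow alive line x y := by
  intro line
  induction line with
  | nil => intro x coords; simp [PySem.List.enumerate_nil, pvRow]
  | cons c cs ih =>
    intro x coords
    rw [PySem.List.enumerate_cons]
    simp only [List.foldl_cons, pvRow]
    by_cases hc : [c] = alive
    · simp [hc, ih]
    · simp [hc, ih]

theorem pvOuterA (alive : List Char) :
    ∀ (ls : List (List Char)) (y : Int) (coords : List (Int × Int × Int)),
    (PySem.List.enumerate ls y).foldl
        (fun coords yl =>
          (PySem.List.enumerate yl.2).foldl
            (fun coords xc => if [xc.2] = alive then coords ++ [(xc.1, yl.1, 1)] else coords)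
            coords) coords
      = coords ++ pvRows alive ls y := by
  intro ls
  induction ls with
  | nil => intro y coords; simp [PySem.List.enumerate_nil, pvRows]
  | cons l t ih =>
    intro y coords
    rw [PySem.List.enumerate_cons]
    simp only [List.foldl_cons, pvRows]
    rw [pvInnerA, ih]
    simp [List.append_assoc]

theorem pvBfold (alive : List Char) :
    ∀ (cs : List Char) (coords : List (Int × Int × Int)) (x y : Int),
    (cs.foldl
        (fun st c =>
          if c = '\n' then (st.1, 0, st.2.2 + 1)
          else ((if [c] = alive then st.1 ++ [(st.2.1, st.2.2, 1)] else st.1),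
                st.2.1 + 1, st.2.2))
        (coords, x, y)).1
      = coords ++ pvScan alive cs x y := by
  intro cs
  induction cs with
  | nil => intro coords x y; simp [pvScan]
  | cons c t ih =>
    intro coords x y
    simp only [List.foldl_cons, pvScan]
    by_cases hc : c = '\n'
    · simp only [hc, if_true]
      exact ih coords 0 (y + 1)
    · simp only [hc, if_false]
      by_cases ha : [c] = alive
      · simp [ha, ih]
      · simp [ha, ih]

theorem pvScan_eq (alive : List Char) :
    ∀ (cs : List Char) (x y : Int),
    (match pvSplit cs with
      | [] => []
      | h :: t => pvRow alive h x y ++ pvRows alive t (y + 1))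
      = pvScan alive cs x y := by
  intro cs
  induction cs with
  | nil => intro x y; simp [pvSplit, pvScan, pvRow, pvRows]
  | cons c t ih =>
    intro x y
    by_cases hc : c = '\n'
    · subst hc
      simp only [pvSplit, if_true, pvScan]
      rw [← ih 0 (y + 1)]
      cases hs : pvSplit t with
      | nil => exact absurd hs (pvSplit_ne_nil t)
      | cons a s => simp [pvRow, pvRows]
    · simp only [pvSplit, hc, if_false, pvScan]
      cases hs : pvSplit t with
      | nil => exact absurd hs (pvSplit_ne_nil t)
      | cons a s =>
        have := ih (x + 1) y
        rw [hs] at this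
        simp only [List.modifyHead_cons, pvRow]
        rw [← this, List.append_assoc]

-- ===== VERDICT (by name: the statement is the Claim_ definition above) =====
theorem pattern_to_coords_spec : Claim_equal_pattern_to_coords := by
  intro pattern_str alive_char _
  unfold Spec_pattern_to_coords pattern_to_coords pattern_to_coords_alt
  simp only []
  rw [pvSplitOn_eq, pvOuterA, pvBfold]
  rw [← pvScan_eq alive_char.toList (PySem.Chars.strip pattern_str.toList) 0 0]
  cases hs : pvSplit (PySem.Chars.strip pattern_str.toList) with
  | nil => exact absurd hs (pvSplit_ne_nil _)
  | cons a t => simp [pvRows]
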